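-- pv_equiv track=rewrite | github.com/RajaYehia/QuantumCity | QuantumCity.py | Sifting5
-- ===== SOURCE A (Python) =====
-- def Sifting5(L1,L2,L3,L4,L5):
--     #Function to get the number of matching received qubit for 4 qubit
--     Lres = []
--     for i in range(len(L1)):
--         ta, ma = L1[i]
--         for j in range(len(L2)):
--             tb, mb = L2[j]
--             if ta == tb:
--                 for k in range(len(L3)):
--                     tc, mc = L3[k]
--                     if tb == tc:
--                         for l in range(len(L4)):
--                             td, md = L4[l]
--                             if td == tc:
--                                 for n in range(len(L5)):
--                                     te,me = L5[n]
--                                     if te == td: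
--                                         Lres.append((ma,mb,mc,md))
--     return Lres
-- ===== SOURCE B (Python) =====
-- def Sifting5(L1, L2, L3, L4, L5):
--     by2, by3, by4, cnt5 = {}, {}, {}, {}
--     for t, m in L2:
--         by2.setdefault(t, []).append(m)
--     for t, m in L3:
--         by3.setdefault(t, []).append(m)
--     for t, m in L4:
--         by4.setdefault(t, []).append(m)
--     for t, m in L5:
--         cnt5[t] = cnt5.get(t, 0) + 1
--     res = []
--     for ta, ma in L1:
--         reps = cnt5.get(ta, 0)
--         for mb in by2.get(ta, []):
--             for mc in by3.get(ta, []):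
--                 for md in by4.get(ta, []):
--                     res.extend([(ma, mb, mc, md)] * reps)
--     return res
-- ===== Notes on version B (the rewrite author's own statement) =====
-- stated objective: faster
-- what changed: Instead of five nested scans comparing times pairwise, B builds one dict per list grouping L2-L4 marks by time and a counter for L5 times, then for each L1 entry emits the cartesian product of its time's groups repeated by the L5 count.
import Mathlib
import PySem

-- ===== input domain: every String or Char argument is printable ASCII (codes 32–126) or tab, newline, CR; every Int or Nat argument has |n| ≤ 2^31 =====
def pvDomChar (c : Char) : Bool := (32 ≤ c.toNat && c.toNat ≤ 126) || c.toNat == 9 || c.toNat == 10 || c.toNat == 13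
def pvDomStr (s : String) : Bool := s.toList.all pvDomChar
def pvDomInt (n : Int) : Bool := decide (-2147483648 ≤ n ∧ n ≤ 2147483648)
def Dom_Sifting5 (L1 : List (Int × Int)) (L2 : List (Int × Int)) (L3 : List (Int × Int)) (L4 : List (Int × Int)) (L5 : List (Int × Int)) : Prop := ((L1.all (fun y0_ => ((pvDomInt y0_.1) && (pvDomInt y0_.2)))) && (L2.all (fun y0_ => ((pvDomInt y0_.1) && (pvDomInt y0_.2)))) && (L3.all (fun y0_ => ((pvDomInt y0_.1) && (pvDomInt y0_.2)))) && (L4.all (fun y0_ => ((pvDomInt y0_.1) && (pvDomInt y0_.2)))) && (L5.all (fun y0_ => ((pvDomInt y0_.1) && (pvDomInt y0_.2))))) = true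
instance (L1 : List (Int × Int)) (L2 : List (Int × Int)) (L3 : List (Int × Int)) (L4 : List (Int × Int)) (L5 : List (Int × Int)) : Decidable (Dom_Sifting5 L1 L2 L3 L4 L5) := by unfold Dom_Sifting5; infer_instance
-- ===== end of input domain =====

-- B replaces A's five nested list scans by dict indexes on the time value (group L2–L4 by time,
-- count L5 by time), then emits the cartesian products per L1 entry — same output, asymptotically faster.

-- ===== PORT A =====
-- A's five nested `for … in range(len(…))` loops, innermost (over L5) first; each helper is one loop body.
def pvA5 (L5 : List (Int × Int)) (s : Int × Int) (tpl : Int × Int × Int × Int) (acc : List (Int × Int × Int × Int)) : List (Int × Int × Int × Int) :=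
  (PySem.List.pyRange 0 (L5.length : Int) 1).foldl (fun acc n =>
    let u := PySem.List.pyGetD L5 n (0, 0)              -- te, me = L5[n]
    if u.1 == s.1 then acc ++ [tpl] else acc) acc       -- te == td: Lres.append((ma,mb,mc,md))

def pvA4 (L4 L5 : List (Int × Int)) (p q r : Int × Int) (acc : List (Int × Int × Int × Int)) : List (Int × Int × Int × Int) :=
  (PySem.List.pyRange 0 (L4.length : Int) 1).foldl (fun acc l =>
    let s := PySem.List.pyGetD L4 l (0, 0)              -- td, md = L4[l]
    if s.1 == r.1 then pvA5 L5 s (p.2, q.2, r.2, s.2) acc else acc) acc   -- td == tc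

def pvA3 (L3 L4 L5 : List (Int × Int)) (p q : Int × Int) (acc : List (Int × Int × Int × Int)) : List (Int × Int × Int × Int) :=
  (PySem.List.pyRange 0 (L3.length : Int) 1).foldl (fun acc k =>
    let r := PySem.List.pyGetD L3 k (0, 0)              -- tc, mc = L3[k]
    if q.1 == r.1 then pvA4 L4 L5 p q r acc else acc) acc   -- tb == tc

def pvA2 (L2 L3 L4 L5 : List (Int × Int)) (p : Int × Int) (acc : List (Int × Int × Int × Int)) : List (Int × Int × Int × Int) :=
  (PySem.List.pyRange 0 (L2.length : Int) 1).foldl (fun acc j =>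
    let q := PySem.List.pyGetD L2 j (0, 0)              -- tb, mb = L2[j]
    if p.1 == q.1 then pvA3 L3 L4 L5 p q acc else acc) acc  -- ta == tb

def Sifting5 (L1 : List (Int × Int)) (L2 : List (Int × Int)) (L3 : List (Int × Int)) (L4 : List (Int × Int)) (L5 : List (Int × Int)) : List (Int × Int × Int × Int) :=
  (PySem.List.pyRange 0 (L1.length : Int) 1).foldl (fun acc i =>
    let p := PySem.List.pyGetD L1 i (0, 0)              -- ta, ma = L1[i]
    pvA2 L2 L3 L4 L5 p acc) []

-- ===== PORT B =====
def Sifting5_alt (L1 : List (Int × Int)) (L2 : List (Int × Int)) (L3 : List (Int × Int)) (L4 : List (Int × Int)) (L5 : List (Int × Int)) : List (Int × Int × Int × Int) :=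
  -- by2/by3/by4: setdefault(t, []).append(m); cnt5: cnt5[t] = cnt5.get(t, 0) + 1
  let by2 : PySem.Dict Int (List Int) := L2.foldl (fun d p => d.modify p.1 [] (· ++ [p.2])) PySem.Dict.empty
  let by3 : PySem.Dict Int (List Int) := L3.foldl (fun d p => d.modify p.1 [] (· ++ [p.2])) PySem.Dict.empty
  let by4 : PySem.Dict Int (List Int) := L4.foldl (fun d p => d.modify p.1 [] (· ++ [p.2])) PySem.Dict.empty
  let cnt5 : PySem.Dict Int Int := L5.foldl (fun d p => d.insert p.1 (d.getD p.1 0 + 1)) PySem.Dict.empty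
  L1.foldl (fun res p =>
    let reps := cnt5.getD p.1 0
    (by2.getD p.1 []).foldl (fun res mb =>
      (by3.getD p.1 []).foldl (fun res mc =>
        (by4.getD p.1 []).foldl (fun res md =>
          res ++ List.replicate reps.toNat (p.2, mb, mc, md)) res) res) res) []

-- ===== PRECONDITION & SPEC =====
def Spec_Sifting5 (L1 : List (Int × Int)) (L2 : List (Int × Int)) (L3 : List (Int × Int)) (L4 : List (Int × Int)) (L5 : List (Int × Int)) (out : List (Int × Int × Int × Int)) : Prop := out = Sifting5_alt L1 L2 L3 L4 L5
instance (L1 : List (Int × Int)) (L2 : List (Int × Int)) (L3 : List (Int × Int)) (L4 : List (Int × Int)) (L5 : List (Int × Int)) (out : List (Int × Int × Int × Int)) : Decidable (Spec_Sifting5 L1 L2 L3 L4 L5 out) := by unfold Spec_Sifting5; infer_instance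

-- ===== CLAIM (what is proved, stated in full; the proofs are below) =====
def Claim_equal_Sifting5 : Prop := ∀ (L1 : List (Int × Int)) (L2 : List (Int × Int)) (L3 : List (Int × Int)) (L4 : List (Int × Int)) (L5 : List (Int × Int)), Dom_Sifting5 L1 L2 L3 L4 L5 → Spec_Sifting5 L1 L2 L3 L4 L5 (Sifting5 L1 L2 L3 L4 L5)

-- ===== LEMMAS AND PROOFS =====

-- the common normal form of both programs: per L1 entry, products of the matching groups
def pvCanon (L1 L2 L3 L4 L5 : List (Int × Int)) : List (Int × Int × Int × Int) :=
  L1.flatMap (fun p =>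
    (L2.filter (fun x => x.1 == p.1)).flatMap (fun q =>
      (L3.filter (fun x => x.1 == p.1)).flatMap (fun r =>
        (L4.filter (fun x => x.1 == p.1)).flatMap (fun s =>
          List.replicate (L5.countP (fun x => x.1 == p.1)) (p.2, q.2, r.2, s.2)))))

theorem pvFoldl_append_if_list {α β : Type} (l : List α) (p : α → Bool) (g : α → List β) (acc : List β) :
    l.foldl (fun acc x => if p x then acc ++ g x else acc) acc = acc ++ (l.filter p).flatMap g := by
  induction l generalizing acc with
  | nil => simp
  | cons a t ih => simp only [List.foldl_cons, List.filter_cons]; by_cases h : p a <;> simp [h, ih]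

theorem pvFilter_map_const {α β : Type} (l : List α) (p : α → Bool) (c : β) :
    ((l.filter p).map fun _ => c) = List.replicate (l.countP p) c := by
  simp [List.map_const', List.countP_eq_length_filter]

theorem pvBeq_comm (a b : Int) : (a == b) = (b == a) := by
  by_cases h : a = b
  · subst h; rfl
  · simp [h, Ne.symm h]

theorem pvA5_eq (L5 : List (Int × Int)) (s : Int × Int) (tpl : Int × Int × Int × Int) (acc : List (Int × Int × Int × Int)) :
    pvA5 L5 s tpl acc = acc ++ List.replicate (L5.countP (fun x => x.1 == s.1)) tpl := by
  unfold pvA5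
  rw [PySem.List.foldl_pyRange_zero_pyGetD' L5 (0, 0)
      (fun acc u => if u.1 == s.1 then acc ++ [tpl] else acc) acc,
    PySem.List.foldl_append_if, pvFilter_map_const]

theorem pvA4_eq (L4 L5 : List (Int × Int)) (p q r : Int × Int) (acc : List (Int × Int × Int × Int)) :
    pvA4 L4 L5 p q r acc = acc ++ (L4.filter (fun x => x.1 == r.1)).flatMap (fun s =>
      List.replicate (L5.countP (fun x => x.1 == s.1)) (p.2, q.2, r.2, s.2)) := by
  unfold pvA4
  rw [PySem.List.foldl_pyRange_zero_pyGetD' L4 (0, 0)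
      (fun acc s => if s.1 == r.1 then pvA5 L5 s (p.2, q.2, r.2, s.2) acc else acc) acc]
  simp only [pvA5_eq]
  rw [pvFoldl_append_if_list]

theorem pvA3_eq (L3 L4 L5 : List (Int × Int)) (p q : Int × Int) (acc : List (Int × Int × Int × Int)) :
    pvA3 L3 L4 L5 p q acc = acc ++ (L3.filter (fun x => q.1 == x.1)).flatMap (fun r =>
      (L4.filter (fun x => x.1 == r.1)).flatMap (fun s =>
        List.replicate (L5.countP (fun x => x.1 == s.1)) (p.2, q.2, r.2, s.2))) := by
  unfold pvA3
  rw [PySem.List.foldl_pyRange_zero_pyGetD' L3 (0, 0)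
      (fun acc r => if q.1 == r.1 then pvA4 L4 L5 p q r acc else acc) acc]
  simp only [pvA4_eq]
  rw [pvFoldl_append_if_list]

theorem pvA2_eq (L2 L3 L4 L5 : List (Int × Int)) (p : Int × Int) (acc : List (Int × Int × Int × Int)) :
    pvA2 L2 L3 L4 L5 p acc = acc ++ (L2.filter (fun x => p.1 == x.1)).flatMap (fun q =>
      (L3.filter (fun x => q.1 == x.1)).flatMap (fun r =>
        (L4.filter (fun x => x.1 == r.1)).flatMap (fun s =>
          List.replicate (L5.countP (fun x => x.1 == s.1)) (p.2, q.2, r.2, s.2)))) := by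
  unfold pvA2
  rw [PySem.List.foldl_pyRange_zero_pyGetD' L2 (0, 0)
      (fun acc q => if p.1 == q.1 then pvA3 L3 L4 L5 p q acc else acc) acc]
  simp only [pvA3_eq]
  rw [pvFoldl_append_if_list]

theorem Sifting5_eq_canon (L1 L2 L3 L4 L5 : List (Int × Int)) :
    Sifting5 L1 L2 L3 L4 L5 = pvCanon L1 L2 L3 L4 L5 := by
  unfold Sifting5 pvCanon
  rw [PySem.List.foldl_pyRange_zero_pyGetD' L1 (0, 0) (fun acc p => pvA2 L2 L3 L4 L5 p acc) []]
  simp only [pvA2_eq]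
  rw [PySem.List.foldl_append_eq_flatMap, List.nil_append]
  refine List.flatMap_congr (fun p hp => ?_)
  rw [List.filter_congr (fun x _ => pvBeq_comm p.1 x.1)]
  refine List.flatMap_congr (fun q hq => ?_)
  have hq1 : q.1 = p.1 := by simpa using (List.mem_filter.mp hq).2
  rw [List.filter_congr (α := Int × Int) (fun x _ => by rw [hq1, pvBeq_comm])]
  refine List.flatMap_congr (fun r hr => ?_)
  have hr1 : r.1 = p.1 := by simpa using (List.mem_filter.mp hr).2
  rw [List.filter_congr (α := Int × Int) (fun x _ => by rw [hr1])]
  refine List.flatMap_congr (fun s hs => ?_)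
  have hs1 : s.1 = p.1 := by simpa using (List.mem_filter.mp hs).2
  rw [show (fun x : Int × Int => x.1 == s.1) = (fun x : Int × Int => x.1 == p.1) from
    funext fun x => by rw [hs1]]

theorem pvGetD_group (l : List (Int × Int)) (t : Int) :
    (l.foldl (fun d p => d.modify p.1 [] (· ++ [p.2])) PySem.Dict.empty).getD t []
      = (l.filter (fun x => x.1 == t)).map (·.2) := by
  rw [PySem.Dict.getD_foldl_modify_append, PySem.Dict.getD_empty, List.nil_append]

theorem pvGetD_cnt_aux (l : List (Int × Int)) (d : PySem.Dict Int Int) (t : Int) :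
    (l.foldl (fun d p => d.insert p.1 (d.getD p.1 0 + 1)) d).getD t 0
      = d.getD t 0 + (l.countP (fun x => x.1 == t) : Int) := by
  induction l generalizing d with
  | nil => simp
  | cons a l ih =>
    simp only [List.foldl_cons, ih, PySem.Dict.getD_insert, List.countP_cons]
    by_cases h : t = a.1
    · simp [h]; ring
    · simp [h, Ne.symm h]

theorem pvGetD_cnt (l : List (Int × Int)) (t : Int) :
    (l.foldl (fun d p => d.insert p.1 (d.getD p.1 0 + 1)) PySem.Dict.empty).getD t 0
      = (l.countP (fun x => x.1 == t) : Int) := by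
  rw [pvGetD_cnt_aux, PySem.Dict.getD_empty, zero_add]

theorem Sifting5_alt_eq_canon (L1 L2 L3 L4 L5 : List (Int × Int)) :
    Sifting5_alt L1 L2 L3 L4 L5 = pvCanon L1 L2 L3 L4 L5 := by
  simp only [Sifting5_alt, pvCanon, pvGetD_group, pvGetD_cnt, Int.toNat_natCast,
    PySem.List.foldl_append_eq_flatMap, List.nil_append, List.flatMap_map]

-- ===== VERDICT (by name: the statement is the Claim_ definition above) =====
theorem Sifting5_spec : Claim_equal_Sifting5 := by
  intro L1 L2 L3 L4 L5 _
  unfold Spec_Sifting5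
  rw [Sifting5_eq_canon, Sifting5_alt_eq_canon]
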